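-- pv_equiv track=rewrite | github.com/GeNiN01/Signature-Based-Portfolio-Allocation | utils.py | leadlag_function
-- ===== SOURCE A (Python) =====
-- def leadlag_function(X):
--     """
--     Parameters
--     ----------
--     X : list
--         elements are tuples of the form (time, value)
--
--     Returns
--     -------
--     l :
--         lead-lag-transformed stream of X
--     """
--     l=[]
--     for j in range(2*(len(X))-1):
--         i1=j//2
--         i2=j//2
--         if j%2!=0:
--             i1+=1
--         l.append((X[i1][1], X[i2][1]))
--     return l
-- ===== SOURCE B (Python) =====
-- def leadlag_function(X):
--     """Lead-lag transform: structural recursion over the value stream,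
--     emitting the diagonal pair and the lead-lag pair per step (no index
--     arithmetic)."""
--     vals = [x[1] for x in X]
--
--     def go(vs):
--         if not vs:
--             return []
--         if len(vs) == 1:
--             return [(vs[0], vs[0])]
--         a, b = vs[0], vs[1]
--         return [(a, a), (b, a)] + go(vs[1:])
--
--     return go(vals)
-- ===== Notes on version B (the rewrite author's own statement) =====
-- stated objective: simpler
-- what changed: Replaces the loop over the 2n-1 output positions with its j//2 / j%2 parity index arithmetic by a structural recursion over the value stream that emits the diagonal pair and the lead-lag pair for each adjacent pair of values.
import Mathlib
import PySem

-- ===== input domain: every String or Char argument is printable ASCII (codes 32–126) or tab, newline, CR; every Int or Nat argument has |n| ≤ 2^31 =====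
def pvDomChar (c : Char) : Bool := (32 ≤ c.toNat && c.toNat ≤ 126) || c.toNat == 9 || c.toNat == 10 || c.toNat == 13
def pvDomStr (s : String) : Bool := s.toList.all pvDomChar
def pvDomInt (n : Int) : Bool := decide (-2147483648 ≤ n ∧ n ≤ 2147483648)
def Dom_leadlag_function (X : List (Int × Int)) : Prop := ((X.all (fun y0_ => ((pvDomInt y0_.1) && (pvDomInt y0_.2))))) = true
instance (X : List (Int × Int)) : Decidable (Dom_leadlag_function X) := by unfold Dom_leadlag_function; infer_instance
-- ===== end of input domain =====

-- B replaces A's loop over the 2n-1 output slots (with j//2 / j%2 parity index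
-- arithmetic) by a structural recursion over the value stream: simpler.

-- ===== PORT A =====
-- for j in range(2*len(X)-1): i1=j//2; i2=j//2; if j%2!=0: i1+=1; l.append((X[i1][1], X[i2][1]))
-- indices are always in range here, so X[i] is ported as pyGetD (Python never raises on these inputs)
def leadlag_function (X : List (Int × Int)) : List (Int × Int) :=
  (PySem.List.pyRange 0 (2 * (X.length : Int) - 1) 1).foldl
    (fun l j =>
      let i1 := PySem.Int.floordiv j 2
      let i2 := PySem.Int.floordiv j 2
      let i1 := if PySem.Int.mod j 2 ≠ 0 then i1 + 1 else i1
      l ++ [((PySem.List.pyGetD X i1 (0, 0)).2, (PySem.List.pyGetD X i2 (0, 0)).2)])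
    []

-- ===== PORT B =====
def leadlagGo : List Int → List (Int × Int)
  | [] => []
  | [a] => [(a, a)]
  | a :: b :: rest => (a, a) :: (b, a) :: leadlagGo (b :: rest)

def leadlag_function_alt (X : List (Int × Int)) : List (Int × Int) :=
  leadlagGo (X.map Prod.snd)

-- ===== PRECONDITION & SPEC =====
def Spec_leadlag_function (X : List (Int × Int)) (out : List (Int × Int)) : Prop := out = leadlag_function_alt X
instance (X : List (Int × Int)) (out : List (Int × Int)) : Decidable (Spec_leadlag_function X out) := by unfold Spec_leadlag_function; infer_instance

-- ===== CLAIM (what is proved, stated in full; the proofs are below) =====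
def Claim_equal_leadlag_function : Prop := ∀ (X : List (Int × Int)), Dom_leadlag_function X → Spec_leadlag_function X (leadlag_function X)

-- ===== LEMMAS AND PROOFS =====

-- appending one value to a nonempty stream appends the two new output pairs
theorem leadlagGo_append (vs : List Int) (v : Int) (h : vs ≠ []) :
    leadlagGo (vs ++ [v]) = leadlagGo vs ++ [(v, vs.getD (vs.length - 1) 0), (v, v)] := by
  induction vs with
  | nil => exact absurd rfl h
  | cons a t ih =>
    cases t with
    | nil => simp [leadlagGo]
    | cons b r =>
      have := ih (by simp)
      simp only [List.cons_append, leadlagGo] at this ⊢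
      rw [this]
      simp only [List.length_cons, List.getD]
      rfl

-- getD of a one-element extension, on an index inside the original list
theorem getD_append_left_lem (xs ys : List Int) (n : Nat) (d : Int) (hn : n < xs.length) :
    (xs ++ ys).getD n d = xs.getD n d := by
  simp [List.getD_eq_getElem?_getD, List.getElem?_append_left hn]

-- closed characterisation of B over the value stream, by reverse induction
theorem mainL (vs : List Int) :
    (List.range (2 * vs.length - 1)).map
      (fun k => (vs.getD ((k + 1) / 2) 0, vs.getD (k / 2) 0)) = leadlagGo vs := by
  induction vs using List.reverseRecOn with
  | nil => simp [leadlagGo]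
  | append_singleton vs v ih =>
    cases vs with
    | nil => simp [leadlagGo, List.range_succ, List.getD]
    | cons a t =>
      set ws : List Int := a :: t with hws
      have hlen : 1 ≤ ws.length := by simp [hws]
      have hrange : 2 * (ws ++ [v]).length - 1 = (2 * ws.length - 1) + 1 + 1 := by
        simp; omega
      rw [hrange, List.range_succ, List.range_succ, List.map_append, List.map_append,
        leadlagGo_append ws v (by simp [hws])]
      have hpref : (List.range (2 * ws.length - 1)).map
          (fun k => ((ws ++ [v]).getD ((k + 1) / 2) 0, (ws ++ [v]).getD (k / 2) 0))
          = (List.range (2 * ws.length - 1)).map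
          (fun k => (ws.getD ((k + 1) / 2) 0, ws.getD (k / 2) 0)) := by
        apply List.map_congr_left
        intro k hk
        rw [List.mem_range] at hk
        rw [getD_append_left_lem _ _ _ _ (by omega), getD_append_left_lem _ _ _ _ (by omega)]
      rw [hpref, ih]
      have h1 : (2 * ws.length - 1 + 1) / 2 = ws.length := by omega
      have h2 : (2 * ws.length - 1) / 2 = ws.length - 1 := by omega
      have h3 : (2 * ws.length - 1 + 1 + 1) / 2 = ws.length := by omega
      have hv1 : (ws ++ [v]).getD ws.length 0 = v := by
        simp [List.getD_eq_getElem?_getD]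
      have hv2 : (ws ++ [v]).getD (ws.length - 1) 0 = ws.getD (ws.length - 1) 0 :=
        getD_append_left_lem _ _ _ _ (by omega)
      simp only [List.map_cons, List.map_nil, h1, h2, h3, hv1, hv2, List.append_assoc]
      rfl

-- A's fold, rewritten to a map over Nat indices, matches the characterisation
theorem portA_eq (X : List (Int × Int)) :
    leadlag_function X = leadlag_function_alt X := by
  unfold leadlag_function leadlag_function_alt
  rw [PySem.List.foldl_append_singleton_eq_map, List.nil_append, PySem.List.pyRange_one]
  have hb : ((2 * (X.length : Int) - 1 - 0)).toNat = 2 * X.length - 1 := by omega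
  rw [hb, ← mainL (X.map Prod.snd)]
  simp only [List.map_map, List.length_map]
  apply List.map_congr_left
  intro k hk
  rw [List.mem_range] at hk
  simp only [Function.comp_apply]
  have hidx : ∀ i : Nat, i < X.length →
      (PySem.List.pyGetD X (i : Int) (0, 0)).2 = (X.map Prod.snd).getD i 0 := by
    intro i hi
    rw [PySem.List.pyGetD_natCast]
    simp [List.getD_eq_getElem?_getD, hi]
  have hq2 : PySem.Int.floordiv (0 + (k : Int)) 2 = (((k / 2 : Nat)) : Int) := by
    rw [Int.zero_add]
    rw [show ((2:Int)) = ((2:Nat):Int) from rfl, PySem.Int.floordiv_natCast]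
  have hm : PySem.Int.mod (0 + (k : Int)) 2 = (((k % 2 : Nat)) : Int) := by
    rw [Int.zero_add]
    rw [show ((2:Int)) = ((2:Nat):Int) from rfl, PySem.Int.mod_natCast]
  simp only [hm, hq2]
  by_cases hpar : k % 2 = 0
  · have hne : ¬ (((k % 2 : Nat)) : Int) ≠ 0 := by simp [hpar]
    rw [if_neg hne]
    have hk2 : k / 2 < X.length := by omega
    have e1 : (k + 1) / 2 = k / 2 := by omega
    rw [hidx _ hk2, e1]
  · have hne : (((k % 2 : Nat)) : Int) ≠ 0 := by
      simp only [ne_eq, Int.natCast_eq_zero]; exact hpar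
    rw [if_pos hne]
    have hk1 : k / 2 + 1 < X.length := by omega
    have hk2 : k / 2 < X.length := by omega
    have e1 : (k + 1) / 2 = k / 2 + 1 := by omega
    rw [show (((k / 2 : Nat)) : Int) + 1 = (((k / 2 + 1 : Nat)) : Int) by push_cast; ring,
      hidx _ hk1, hidx _ hk2, e1]

-- ===== VERDICT (by name: the statement is the Claim_ definition above) =====
theorem leadlag_function_spec : Claim_equal_leadlag_function := by
  intro X _
  unfold Spec_leadlag_function
  exact portA_eq X
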